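-- pv_equiv track=rewrite | github.com/EngineerMinded/AdventOfCode | 2025/day9.py | is_green_tile
-- ===== SOURCE A (Python) =====
-- def is_green_tile(coor,green_tiles,red_tiles):
--     x,y = coor
--     l = False
--     r = False
--     u = False
--     d = False
--     for rx,ry in red_tiles:
--         if rx == x and ry < y:
--             u = True
--         if rx == x and ry > y:
--              d = True
--         if ry == y and rx < x:
--              l = True
--         if ry == y and rx > x:
--              r = True
--         if l and r and d and u:
--             break
--     for rx,ry in green_tiles:
--          if rx == x and ry < y:
--             u = True
--          if rx == x and ry > y:
--            d = True
--          if ry == y and rx < x: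
--             l = True
--          if ry == y and rx > x:
--             r = True
--          if l and r and d  and u:
--              break
--     return l and d and u and r
-- ===== SOURCE B (Python) =====
-- from itertools import chain
--
-- def is_green_tile(coor, green_tiles, red_tiles):
--     x, y = coor
--     up = any(tx == x and ty < y for tx, ty in chain(red_tiles, green_tiles))
--     down = any(tx == x and ty > y for tx, ty in chain(red_tiles, green_tiles))
--     left = any(ty == y and tx < x for tx, ty in chain(red_tiles, green_tiles))
--     right = any(ty == y and tx > x for tx, ty in chain(red_tiles, green_tiles))
--     return up and down and left and right
-- ===== Notes on version B (the rewrite author's own statement) =====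
-- stated objective: simpler
-- what changed: Replaces A's single flag-accumulating pass with early break over two separate lists by four independent any() existence scans over the concatenation of red and green tiles, one per direction.
import Mathlib
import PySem

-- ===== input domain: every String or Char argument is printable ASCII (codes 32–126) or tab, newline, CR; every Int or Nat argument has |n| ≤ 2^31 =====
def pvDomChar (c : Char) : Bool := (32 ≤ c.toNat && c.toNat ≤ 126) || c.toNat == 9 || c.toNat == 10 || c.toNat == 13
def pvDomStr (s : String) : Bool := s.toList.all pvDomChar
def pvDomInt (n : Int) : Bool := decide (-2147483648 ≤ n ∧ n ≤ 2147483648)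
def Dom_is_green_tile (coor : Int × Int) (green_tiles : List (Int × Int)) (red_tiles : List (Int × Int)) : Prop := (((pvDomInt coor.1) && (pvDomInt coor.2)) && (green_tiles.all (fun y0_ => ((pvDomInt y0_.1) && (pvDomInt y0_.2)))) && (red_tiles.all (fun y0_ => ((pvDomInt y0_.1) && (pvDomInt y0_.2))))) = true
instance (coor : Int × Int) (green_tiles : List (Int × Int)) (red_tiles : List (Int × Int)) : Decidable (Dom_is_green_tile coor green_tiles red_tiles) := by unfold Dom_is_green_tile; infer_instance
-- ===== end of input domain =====

-- ===== PORT A =====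
-- B changes the decomposition: four independent existence scans instead of A's one flag-accumulating pass with early break.
-- A's loop over a tile list, updating the four flags and breaking when all are set.
def pvLoopA (x y : Int) : List (Int × Int) → Bool × Bool × Bool × Bool → Bool × Bool × Bool × Bool
  | [], st => st
  | (rx, ry) :: ts, (l, r, u, d) =>
    let u := if rx == x && ry < y then true else u
    let d := if rx == x && ry > y then true else d
    let l := if ry == y && rx < x then true else l
    let r := if ry == y && rx > x then true else r
    if l && r && d && u then (l, r, u, d) else pvLoopA x y ts (l, r, u, d)

def is_green_tile (coor : Int × Int) (green_tiles : List (Int × Int)) (red_tiles : List (Int × Int)) : Bool :=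
  let x := coor.1
  let y := coor.2
  let st := pvLoopA x y red_tiles (false, false, false, false)
  let st := pvLoopA x y green_tiles st
  st.1 && st.2.2.2 && st.2.2.1 && st.2.1

-- ===== PORT B =====
def is_green_tile_alt (coor : Int × Int) (green_tiles : List (Int × Int)) (red_tiles : List (Int × Int)) : Bool :=
  let x := coor.1
  let y := coor.2
  let up := (red_tiles ++ green_tiles).any (fun t => t.1 == x && t.2 < y)
  let down := (red_tiles ++ green_tiles).any (fun t => t.1 == x && t.2 > y)
  let left := (red_tiles ++ green_tiles).any (fun t => t.2 == y && t.1 < x)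
  let right := (red_tiles ++ green_tiles).any (fun t => t.2 == y && t.1 > x)
  up && down && left && right

-- ===== PRECONDITION & SPEC =====
def Spec_is_green_tile (coor : Int × Int) (green_tiles : List (Int × Int)) (red_tiles : List (Int × Int)) (out : Bool) : Prop := out = is_green_tile_alt coor green_tiles red_tiles
instance (coor : Int × Int) (green_tiles : List (Int × Int)) (red_tiles : List (Int × Int)) (out : Bool) : Decidable (Spec_is_green_tile coor green_tiles red_tiles out) := by unfold Spec_is_green_tile; infer_instance

-- ===== CLAIM =====
def Claim_equal_is_green_tile : Prop := ∀ (coor : Int × Int) (green_tiles : List (Int × Int)) (red_tiles : List (Int × Int)), Dom_is_green_tile coor green_tiles red_tiles → Spec_is_green_tile coor green_tiles red_tiles (is_green_tile coor green_tiles red_tiles)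

-- ===== LEMMAS AND PROOFS =====
theorem pvLoopA_eq (x y : Int) (ts : List (Int × Int)) (l r u d : Bool) :
    pvLoopA x y ts (l, r, u, d) =
      (l || ts.any (fun t => t.2 == y && t.1 < x),
       r || ts.any (fun t => t.2 == y && t.1 > x),
       u || ts.any (fun t => t.1 == x && t.2 < y),
       d || ts.any (fun t => t.1 == x && t.2 > y)) := by
  induction ts generalizing l r u d with
  | nil => simp [pvLoopA]
  | cons h ts ih =>
    obtain ⟨rx, ry⟩ := h
    have hift : ∀ (c b : Bool), (if c = true then true else b) = (b || c) := by
      intro c b; cases c <;> cases b <;> simp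
    simp only [pvLoopA, List.any_cons, hift]
    split_ifs with hbrk
    · simp only [Bool.and_eq_true] at hbrk
      obtain ⟨⟨⟨hl, hr⟩, hd⟩, hu⟩ := hbrk
      simp only [← Bool.or_assoc, hl, hr, hd, hu, Bool.true_or]
    · rw [ih]
      simp only [Bool.or_assoc]

-- ===== VERDICT =====
theorem is_green_tile_spec : Claim_equal_is_green_tile := by
  intro coor green_tiles red_tiles _
  unfold Spec_is_green_tile is_green_tile is_green_tile_alt
  simp only [pvLoopA_eq, List.any_append]
  cases (red_tiles.any (fun t => t.2 == coor.2 && t.1 < coor.1)) <;>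
  cases (green_tiles.any (fun t => t.2 == coor.2 && t.1 < coor.1)) <;>
  cases (red_tiles.any (fun t => t.2 == coor.2 && t.1 > coor.1)) <;>
  cases (green_tiles.any (fun t => t.2 == coor.2 && t.1 > coor.1)) <;>
  cases (red_tiles.any (fun t => t.1 == coor.1 && t.2 < coor.2)) <;>
  cases (green_tiles.any (fun t => t.1 == coor.1 && t.2 < coor.2)) <;>
  cases (red_tiles.any (fun t => t.1 == coor.1 && t.2 > coor.2)) <;>
  cases (green_tiles.any (fun t => t.1 == coor.1 && t.2 > coor.2)) <;>
  simp
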